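-- pv_equiv track=rewrite | github.com/blu1606/Medagen_FE | src/scripts/PDF2TXT_Rang-Ham-Mat.py | find_chapter
-- ===== SOURCE A (Python) =====
-- CHAPTERS = [
--     ("CHƯƠNG 1. BỆNH DA NHIỄM KHUẨN", 8),
--     ("CHƯƠNG 2. BỆNH DA DO KÝ SINH TRÙNG – CÔN TRÙNG", 40),
--     ("CHƯƠNG 3. BỆNH DA DO VI RÚT", 67),
--     ("CHƯƠNG 4. BỆNH DA TỰ MIỄN", 81),
--     ("CHƯƠNG 5. BỆNH DA DỊ ỨNG – MIỄN DỊCH", 114),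
--     ("CHƯƠNG 6. BỆNH ĐỎ DA CÓ VẢY", 154),
--     ("CHƯƠNG 7. BỆNH LÂY TRUYỀN QUA ĐƯỜNG TÌNH DỤC", 185),
--     ("CHƯƠNG 8. U DA", 221),
--     ("CHƯƠNG 9. CÁC BỆNH DA DI TRUYỀN", 241),
--     ("CHƯƠNG 10. RỐI LOẠN SẮC TỐ", 281),
--     ("CHƯƠNG 11. CÁC BỆNH DA KHÁC", 293),
-- ]
--
-- def find_chapter(page: int):
--     chosen = None
--     for chapter, start in CHAPTERS:
--         if start <= page:
--             chosen = chapter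
--         else:
--             break
--     return chosen or "CHƯƠNG_KHÁC"
-- ===== SOURCE B (Python) =====
-- CHAPTERS = [
--     ("CHƯƠNG 1. BỆNH DA NHIỄM KHUẨN", 8),
--     ("CHƯƠNG 2. BỆNH DA DO KÝ SINH TRÙNG – CÔN TRÙNG", 40),
--     ("CHƯƠNG 3. BỆNH DA DO VI RÚT", 67),
--     ("CHƯƠNG 4. BỆNH DA TỰ MIỄN", 81),
--     ("CHƯƠNG 5. BỆNH DA DỊ ỨNG – MIỄN DỊCH", 114),
--     ("CHƯƠNG 6. BỆNH ĐỎ DA CÓ VẢY", 154),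
--     ("CHƯƠNG 7. BỆNH LÂY TRUYỀN QUA ĐƯỜNG TÌNH DỤC", 185),
--     ("CHƯƠNG 8. U DA", 221),
--     ("CHƯƠNG 9. CÁC BỆNH DA DI TRUYỀN", 241),
--     ("CHƯƠNG 10. RỐI LOẠN SẮC TỐ", 281),
--     ("CHƯƠNG 11. CÁC BỆNH DA KHÁC", 293),
-- ]
--
-- STARTS = [start for _, start in CHAPTERS]
--
-- def find_chapter(page: int):
--     # binary search: count of chapter starts <= page (bisect_right by hand)
--     lo, hi = 0, len(STARTS)
--     while lo < hi:
--         mid = (lo + hi) // 2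
--         if page < STARTS[mid]:
--             hi = mid
--         else:
--             lo = mid + 1
--     if lo == 0:
--         return "CHƯƠNG_KHÁC"
--     return CHAPTERS[lo - 1][0]
-- ===== Notes on version B (the rewrite author's own statement) =====
-- stated objective: alternative
-- what changed: Replaces A's break-terminated linear scan over CHAPTERS with a hand-written bisect_right binary search over the precomputed sorted list of start pages.
import Mathlib
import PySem

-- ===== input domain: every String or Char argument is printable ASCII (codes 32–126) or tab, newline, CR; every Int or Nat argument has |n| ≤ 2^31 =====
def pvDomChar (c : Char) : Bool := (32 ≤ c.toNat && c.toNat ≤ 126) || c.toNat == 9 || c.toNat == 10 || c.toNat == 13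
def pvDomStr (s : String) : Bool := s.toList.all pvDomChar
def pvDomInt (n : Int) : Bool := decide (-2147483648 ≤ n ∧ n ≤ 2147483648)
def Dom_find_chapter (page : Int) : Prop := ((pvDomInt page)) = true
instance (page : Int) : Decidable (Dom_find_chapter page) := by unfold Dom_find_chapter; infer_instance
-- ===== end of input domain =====

-- B replaces A's break-terminated linear scan over CHAPTERS with a binary search (bisect_right by hand)
-- over the precomputed sorted start pages; objective: alternative (fixed tiny table, no measurable speed claim).

-- ===== PORT A =====
def pvChapters : List (String × Int) :=
  [("CHƯƠNG 1. BỆNH DA NHIỄM KHUẨN", 8),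
   ("CHƯƠNG 2. BỆNH DA DO KÝ SINH TRÙNG – CÔN TRÙNG", 40),
   ("CHƯƠNG 3. BỆNH DA DO VI RÚT", 67),
   ("CHƯƠNG 4. BỆNH DA TỰ MIỄN", 81),
   ("CHƯƠNG 5. BỆNH DA DỊ ỨNG – MIỄN DỊCH", 114),
   ("CHƯƠNG 6. BỆNH ĐỎ DA CÓ VẢY", 154),
   ("CHƯƠNG 7. BỆNH LÂY TRUYỀN QUA ĐƯỜNG TÌNH DỤC", 185),
   ("CHƯƠNG 8. U DA", 221),
   ("CHƯƠNG 9. CÁC BỆNH DA DI TRUYỀN", 241),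
   ("CHƯƠNG 10. RỐI LOẠN SẮC TỐ", 281),
   ("CHƯƠNG 11. CÁC BỆNH DA KHÁC", 293)]

-- A's for-loop with break: carry `chosen : Option String`, stop at the first start > page.
def pvScanA (page : Int) : List (String × Int) → Option String → Option String
  | [], chosen => chosen
  | (chapter, start) :: rest, chosen =>
      if start ≤ page then pvScanA page rest (some chapter) else chosen

def find_chapter (page : Int) : String :=
  -- `chosen or "CHƯƠNG_KHÁC"`: chosen is None or one of the non-empty chapter literals,
  -- so Python's `or` truthiness coincides with this match.
  match pvScanA page pvChapters none with
  | some c => c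
  | none => "CHƯƠNG_KHÁC"

-- ===== PORT B =====
def pvStarts : List Int := pvChapters.map Prod.snd

-- hand-written bisect_right loop from Source B; mid is always in range, getD's default is never used;
-- fuel is a pure totality guard (hi - lo shrinks each step, so fuel = length suffices)
def pvBisect (page : Int) : Nat → Nat → Nat → Nat
  | 0, lo, _ => lo
  | fuel + 1, lo, hi =>
      if lo < hi then
        let mid := (lo + hi) / 2
        if page < pvStarts.getD mid 0 then pvBisect page fuel lo mid
        else pvBisect page fuel (mid + 1) hi
      else lo

def find_chapter_alt (page : Int) : String :=
  let lo := pvBisect page pvStarts.length 0 pvStarts.length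
  if lo = 0 then "CHƯƠNG_KHÁC"
  else (pvChapters.getD (lo - 1) ("", 0)).1

-- ===== PRECONDITION & SPEC =====
def Spec_find_chapter (page : Int) (out : String) : Prop := out = find_chapter_alt page
instance (page : Int) (out : String) : Decidable (Spec_find_chapter page out) := by unfold Spec_find_chapter; infer_instance

-- ===== CLAIM (what is proved, stated in full; the proofs are below) =====
def Claim_equal_find_chapter : Prop := ∀ (page : Int), Dom_find_chapter page → Spec_find_chapter page (find_chapter page)

-- ===== LEMMAS AND PROOFS =====

-- ===== VERDICT (by name: the statement is the Claim_ definition above) =====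
set_option maxRecDepth 8000 in
theorem find_chapter_spec : Claim_equal_find_chapter := by
  intro page _
  unfold Spec_find_chapter
  rcases lt_or_ge page 8 with h0|h0
  · have : ¬ (8:Int) ≤ page := by omega
    have : page < (8:Int) := by omega
    have : ¬ (40:Int) ≤ page := by omega
    have : page < (40:Int) := by omega
    have : ¬ (67:Int) ≤ page := by omega
    have : page < (67:Int) := by omega
    have : ¬ (81:Int) ≤ page := by omega
    have : page < (81:Int) := by omega
    have : ¬ (114:Int) ≤ page := by omega
    have : page < (114:Int) := by omega
    have : ¬ (154:Int) ≤ page := by omega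
    have : page < (154:Int) := by omega
    have : ¬ (185:Int) ≤ page := by omega
    have : page < (185:Int) := by omega
    have : ¬ (221:Int) ≤ page := by omega
    have : page < (221:Int) := by omega
    have : ¬ (241:Int) ≤ page := by omega
    have : page < (241:Int) := by omega
    have : ¬ (281:Int) ≤ page := by omega
    have : page < (281:Int) := by omega
    have : ¬ (293:Int) ≤ page := by omega
    have : page < (293:Int) := by omega
    simp [find_chapter, find_chapter_alt, pvScanA, pvBisect, pvStarts, pvChapters, *]
  · rcases lt_or_ge page 40 with h1|h1
    · have : (8:Int) ≤ page := by omega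
      have : ¬ page < (8:Int) := by omega
      have : ¬ (40:Int) ≤ page := by omega
      have : page < (40:Int) := by omega
      have : ¬ (67:Int) ≤ page := by omega
      have : page < (67:Int) := by omega
      have : ¬ (81:Int) ≤ page := by omega
      have : page < (81:Int) := by omega
      have : ¬ (114:Int) ≤ page := by omega
      have : page < (114:Int) := by omega
      have : ¬ (154:Int) ≤ page := by omega
      have : page < (154:Int) := by omega
      have : ¬ (185:Int) ≤ page := by omega
      have : page < (185:Int) := by omega
      have : ¬ (221:Int) ≤ page := by omega
      have : page < (221:Int) := by omega
      have : ¬ (241:Int) ≤ page := by omega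
      have : page < (241:Int) := by omega
      have : ¬ (281:Int) ≤ page := by omega
      have : page < (281:Int) := by omega
      have : ¬ (293:Int) ≤ page := by omega
      have : page < (293:Int) := by omega
      simp [find_chapter, find_chapter_alt, pvScanA, pvBisect, pvStarts, pvChapters, *]
    · rcases lt_or_ge page 67 with h2|h2
      · have : (8:Int) ≤ page := by omega
        have : ¬ page < (8:Int) := by omega
        have : (40:Int) ≤ page := by omega
        have : ¬ page < (40:Int) := by omega
        have : ¬ (67:Int) ≤ page := by omega
        have : page < (67:Int) := by omega
        have : ¬ (81:Int) ≤ page := by omega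
        have : page < (81:Int) := by omega
        have : ¬ (114:Int) ≤ page := by omega
        have : page < (114:Int) := by omega
        have : ¬ (154:Int) ≤ page := by omega
        have : page < (154:Int) := by omega
        have : ¬ (185:Int) ≤ page := by omega
        have : page < (185:Int) := by omega
        have : ¬ (221:Int) ≤ page := by omega
        have : page < (221:Int) := by omega
        have : ¬ (241:Int) ≤ page := by omega
        have : page < (241:Int) := by omega
        have : ¬ (281:Int) ≤ page := by omega
        have : page < (281:Int) := by omega
        have : ¬ (293:Int) ≤ page := by omega
        have : page < (293:Int) := by omega
        simp [find_chapter, find_chapter_alt, pvScanA, pvBisect, pvStarts, pvChapters, *]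
      · rcases lt_or_ge page 81 with h3|h3
        · have : (8:Int) ≤ page := by omega
          have : ¬ page < (8:Int) := by omega
          have : (40:Int) ≤ page := by omega
          have : ¬ page < (40:Int) := by omega
          have : (67:Int) ≤ page := by omega
          have : ¬ page < (67:Int) := by omega
          have : ¬ (81:Int) ≤ page := by omega
          have : page < (81:Int) := by omega
          have : ¬ (114:Int) ≤ page := by omega
          have : page < (114:Int) := by omega
          have : ¬ (154:Int) ≤ page := by omega
          have : page < (154:Int) := by omega
          have : ¬ (185:Int) ≤ page := by omega
          have : page < (185:Int) := by omega
          have : ¬ (221:Int) ≤ page := by omega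
          have : page < (221:Int) := by omega
          have : ¬ (241:Int) ≤ page := by omega
          have : page < (241:Int) := by omega
          have : ¬ (281:Int) ≤ page := by omega
          have : page < (281:Int) := by omega
          have : ¬ (293:Int) ≤ page := by omega
          have : page < (293:Int) := by omega
          simp [find_chapter, find_chapter_alt, pvScanA, pvBisect, pvStarts, pvChapters, *]
        · rcases lt_or_ge page 114 with h4|h4
          · have : (8:Int) ≤ page := by omega
            have : ¬ page < (8:Int) := by omega
            have : (40:Int) ≤ page := by omega
            have : ¬ page < (40:Int) := by omega
            have : (67:Int) ≤ page := by omega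
            have : ¬ page < (67:Int) := by omega
            have : (81:Int) ≤ page := by omega
            have : ¬ page < (81:Int) := by omega
            have : ¬ (114:Int) ≤ page := by omega
            have : page < (114:Int) := by omega
            have : ¬ (154:Int) ≤ page := by omega
            have : page < (154:Int) := by omega
            have : ¬ (185:Int) ≤ page := by omega
            have : page < (185:Int) := by omega
            have : ¬ (221:Int) ≤ page := by omega
            have : page < (221:Int) := by omega
            have : ¬ (241:Int) ≤ page := by omega
            have : page < (241:Int) := by omega
            have : ¬ (281:Int) ≤ page := by omega
            have : page < (281:Int) := by omega
            have : ¬ (293:Int) ≤ page := by omega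
            have : page < (293:Int) := by omega
            simp [find_chapter, find_chapter_alt, pvScanA, pvBisect, pvStarts, pvChapters, *]
          · rcases lt_or_ge page 154 with h5|h5
            · have : (8:Int) ≤ page := by omega
              have : ¬ page < (8:Int) := by omega
              have : (40:Int) ≤ page := by omega
              have : ¬ page < (40:Int) := by omega
              have : (67:Int) ≤ page := by omega
              have : ¬ page < (67:Int) := by omega
              have : (81:Int) ≤ page := by omega
              have : ¬ page < (81:Int) := by omega
              have : (114:Int) ≤ page := by omega
              have : ¬ page < (114:Int) := by omega
              have : ¬ (154:Int) ≤ page := by omega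
              have : page < (154:Int) := by omega
              have : ¬ (185:Int) ≤ page := by omega
              have : page < (185:Int) := by omega
              have : ¬ (221:Int) ≤ page := by omega
              have : page < (221:Int) := by omega
              have : ¬ (241:Int) ≤ page := by omega
              have : page < (241:Int) := by omega
              have : ¬ (281:Int) ≤ page := by omega
              have : page < (281:Int) := by omega
              have : ¬ (293:Int) ≤ page := by omega
              have : page < (293:Int) := by omega
              simp [find_chapter, find_chapter_alt, pvScanA, pvBisect, pvStarts, pvChapters, *]
            · rcases lt_or_ge page 185 with h6|h6
              · have : (8:Int) ≤ page := by omega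
                have : ¬ page < (8:Int) := by omega
                have : (40:Int) ≤ page := by omega
                have : ¬ page < (40:Int) := by omega
                have : (67:Int) ≤ page := by omega
                have : ¬ page < (67:Int) := by omega
                have : (81:Int) ≤ page := by omega
                have : ¬ page < (81:Int) := by omega
                have : (114:Int) ≤ page := by omega
                have : ¬ page < (114:Int) := by omega
                have : (154:Int) ≤ page := by omega
                have : ¬ page < (154:Int) := by omega
                have : ¬ (185:Int) ≤ page := by omega
                have : page < (185:Int) := by omega
                have : ¬ (221:Int) ≤ page := by omega
                have : page < (221:Int) := by omega
                have : ¬ (241:Int) ≤ page := by omega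
                have : page < (241:Int) := by omega
                have : ¬ (281:Int) ≤ page := by omega
                have : page < (281:Int) := by omega
                have : ¬ (293:Int) ≤ page := by omega
                have : page < (293:Int) := by omega
                simp [find_chapter, find_chapter_alt, pvScanA, pvBisect, pvStarts, pvChapters, *]
              · rcases lt_or_ge page 221 with h7|h7
                · have : (8:Int) ≤ page := by omega
                  have : ¬ page < (8:Int) := by omega
                  have : (40:Int) ≤ page := by omega
                  have : ¬ page < (40:Int) := by omega
                  have : (67:Int) ≤ page := by omega
                  have : ¬ page < (67:Int) := by omega
                  have : (81:Int) ≤ page := by omega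
                  have : ¬ page < (81:Int) := by omega
                  have : (114:Int) ≤ page := by omega
                  have : ¬ page < (114:Int) := by omega
                  have : (154:Int) ≤ page := by omega
                  have : ¬ page < (154:Int) := by omega
                  have : (185:Int) ≤ page := by omega
                  have : ¬ page < (185:Int) := by omega
                  have : ¬ (221:Int) ≤ page := by omega
                  have : page < (221:Int) := by omega
                  have : ¬ (241:Int) ≤ page := by omega
                  have : page < (241:Int) := by omega
                  have : ¬ (281:Int) ≤ page := by omega
                  have : page < (281:Int) := by omega
                  have : ¬ (293:Int) ≤ page := by omega
                  have : page < (293:Int) := by omega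
                  simp [find_chapter, find_chapter_alt, pvScanA, pvBisect, pvStarts, pvChapters, *]
                · rcases lt_or_ge page 241 with h8|h8
                  · have : (8:Int) ≤ page := by omega
                    have : ¬ page < (8:Int) := by omega
                    have : (40:Int) ≤ page := by omega
                    have : ¬ page < (40:Int) := by omega
                    have : (67:Int) ≤ page := by omega
                    have : ¬ page < (67:Int) := by omega
                    have : (81:Int) ≤ page := by omega
                    have : ¬ page < (81:Int) := by omega
                    have : (114:Int) ≤ page := by omega
                    have : ¬ page < (114:Int) := by omega
                    have : (154:Int) ≤ page := by omega
                    have : ¬ page < (154:Int) := by omega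
                    have : (185:Int) ≤ page := by omega
                    have : ¬ page < (185:Int) := by omega
                    have : (221:Int) ≤ page := by omega
                    have : ¬ page < (221:Int) := by omega
                    have : ¬ (241:Int) ≤ page := by omega
                    have : page < (241:Int) := by omega
                    have : ¬ (281:Int) ≤ page := by omega
                    have : page < (281:Int) := by omega
                    have : ¬ (293:Int) ≤ page := by omega
                    have : page < (293:Int) := by omega
                    simp [find_chapter, find_chapter_alt, pvScanA, pvBisect, pvStarts, pvChapters, *]
                  · rcases lt_or_ge page 281 with h9|h9
                    · have : (8:Int) ≤ page := by omega
                      have : ¬ page < (8:Int) := by omega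
                      have : (40:Int) ≤ page := by omega
                      have : ¬ page < (40:Int) := by omega
                      have : (67:Int) ≤ page := by omega
                      have : ¬ page < (67:Int) := by omega
                      have : (81:Int) ≤ page := by omega
                      have : ¬ page < (81:Int) := by omega
                      have : (114:Int) ≤ page := by omega
                      have : ¬ page < (114:Int) := by omega
                      have : (154:Int) ≤ page := by omega
                      have : ¬ page < (154:Int) := by omega
                      have : (185:Int) ≤ page := by omega
                      have : ¬ page < (185:Int) := by omega
                      have : (221:Int) ≤ page := by omega
                      have : ¬ page < (221:Int) := by omega
                      have : (241:Int) ≤ page := by omega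
                      have : ¬ page < (241:Int) := by omega
                      have : ¬ (281:Int) ≤ page := by omega
                      have : page < (281:Int) := by omega
                      have : ¬ (293:Int) ≤ page := by omega
                      have : page < (293:Int) := by omega
                      simp [find_chapter, find_chapter_alt, pvScanA, pvBisect, pvStarts, pvChapters, *]
                    · rcases lt_or_ge page 293 with h10|h10
                      · have : (8:Int) ≤ page := by omega
                        have : ¬ page < (8:Int) := by omega
                        have : (40:Int) ≤ page := by omega
                        have : ¬ page < (40:Int) := by omega
                        have : (67:Int) ≤ page := by omega
                        have : ¬ page < (67:Int) := by omega
                        have : (81:Int) ≤ page := by omega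
                        have : ¬ page < (81:Int) := by omega
                        have : (114:Int) ≤ page := by omega
                        have : ¬ page < (114:Int) := by omega
                        have : (154:Int) ≤ page := by omega
                        have : ¬ page < (154:Int) := by omega
                        have : (185:Int) ≤ page := by omega
                        have : ¬ page < (185:Int) := by omega
                        have : (221:Int) ≤ page := by omega
                        have : ¬ page < (221:Int) := by omega
                        have : (241:Int) ≤ page := by omega
                        have : ¬ page < (241:Int) := by omega
                        have : (281:Int) ≤ page := by omega
                        have : ¬ page < (281:Int) := by omega
                        have : ¬ (293:Int) ≤ page := by omega
                        have : page < (293:Int) := by omega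
                        simp [find_chapter, find_chapter_alt, pvScanA, pvBisect, pvStarts, pvChapters, *]
                      · have : (8:Int) ≤ page := by omega
                        have : ¬ page < (8:Int) := by omega
                        have : (40:Int) ≤ page := by omega
                        have : ¬ page < (40:Int) := by omega
                        have : (67:Int) ≤ page := by omega
                        have : ¬ page < (67:Int) := by omega
                        have : (81:Int) ≤ page := by omega
                        have : ¬ page < (81:Int) := by omega
                        have : (114:Int) ≤ page := by omega
                        have : ¬ page < (114:Int) := by omega
                        have : (154:Int) ≤ page := by omega
                        have : ¬ page < (154:Int) := by omega
                        have : (185:Int) ≤ page := by omega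
                        have : ¬ page < (185:Int) := by omega
                        have : (221:Int) ≤ page := by omega
                        have : ¬ page < (221:Int) := by omega
                        have : (241:Int) ≤ page := by omega
                        have : ¬ page < (241:Int) := by omega
                        have : (281:Int) ≤ page := by omega
                        have : ¬ page < (281:Int) := by omega
                        have : (293:Int) ≤ page := by omega
                        have : ¬ page < (293:Int) := by omega
                        simp [find_chapter, find_chapter_alt, pvScanA, pvBisect, pvStarts, pvChapters, *]
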